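-- pv_equiv track=rewrite | github.com/clwalther/Printer | main.py | generateSupportPillarFaces
-- ===== SOURCE A (Python) =====
-- def generateSupportPillarFaces(zero):
--     faces  = []
--     nIndex = 6
--     for index in range(1, 7):
--         faces.append([zero, index + zero, nIndex + zero])
--         faces.append([index + zero, nIndex + zero, index + 6 + zero])
--         faces.append([index + 6 + zero, nIndex + 6 + zero, nIndex + zero])
--         faces.append([zero + 13, index + 6 + zero, nIndex + 6 + zero])
--         nIndex = index
--     return faces
-- ===== SOURCE B (Python) =====
-- # The pillar topology is fixed: a fixed set of triangles. Tabulate the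
-- # vertex offsets once and translate the whole table by `zero`.
-- _PILLAR_FACE_OFFSETS = [
--     [0, 1, 6],  [1, 6, 7],   [7, 12, 6],  [13, 7, 12],
--     [0, 2, 1],  [2, 1, 8],   [8, 7, 1],   [13, 8, 7],
--     [0, 3, 2],  [3, 2, 9],   [9, 8, 2],   [13, 9, 8],
--     [0, 4, 3],  [4, 3, 10],  [10, 9, 3],  [13, 10, 9],
--     [0, 5, 4],  [5, 4, 11],  [11, 10, 4], [13, 11, 10],
--     [0, 6, 5],  [6, 5, 12],  [12, 11, 5], [13, 12, 11],
-- ]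
--
-- def generateSupportPillarFaces(zero):
--     return [[offset + zero for offset in face] for face in _PILLAR_FACE_OFFSETS]
-- ===== Notes on version B (the rewrite author's own statement) =====
-- stated objective: simpler
-- what changed: Replaced the loop over indices 1..6 with its carried nIndex accumulator by a precomputed constant table of all face offset-triples, translated by zero in one map; no index loop or predecessor state remains.
import Mathlib
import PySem

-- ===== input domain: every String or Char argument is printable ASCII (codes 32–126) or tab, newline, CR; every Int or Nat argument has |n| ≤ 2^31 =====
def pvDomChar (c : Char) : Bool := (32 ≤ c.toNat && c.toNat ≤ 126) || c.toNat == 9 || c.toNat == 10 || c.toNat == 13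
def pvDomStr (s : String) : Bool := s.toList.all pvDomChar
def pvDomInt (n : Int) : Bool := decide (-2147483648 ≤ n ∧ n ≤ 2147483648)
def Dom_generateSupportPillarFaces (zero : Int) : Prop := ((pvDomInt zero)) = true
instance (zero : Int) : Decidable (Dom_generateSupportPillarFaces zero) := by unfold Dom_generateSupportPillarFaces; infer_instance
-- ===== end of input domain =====

-- B replaces the index loop and its nIndex accumulator by a precomputed constant
-- table of all face offset-triples translated by zero; objective: simpler.

-- ===== PORT A =====
def generateSupportPillarFaces (zero : Int) : List (List Int) :=
  (PySem.List.pyRange 1 7 1).foldl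
    (fun (st : List (List Int) × Int) index =>
      let faces := st.1
      let nIndex := st.2
      let faces := faces ++ [[zero, index + zero, nIndex + zero]]
      let faces := faces ++ [[index + zero, nIndex + zero, index + 6 + zero]]
      let faces := faces ++ [[index + 6 + zero, nIndex + 6 + zero, nIndex + zero]]
      let faces := faces ++ [[zero + 13, index + 6 + zero, nIndex + 6 + zero]]
      (faces, index))
    ([], 6) |>.1

-- ===== PORT B =====
def pillarFaceOffsets : List (List Int) :=
  [[0, 1, 6],  [1, 6, 7],   [7, 12, 6],  [13, 7, 12],
   [0, 2, 1],  [2, 1, 8],   [8, 7, 1],   [13, 8, 7],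
   [0, 3, 2],  [3, 2, 9],   [9, 8, 2],   [13, 9, 8],
   [0, 4, 3],  [4, 3, 10],  [10, 9, 3],  [13, 10, 9],
   [0, 5, 4],  [5, 4, 11],  [11, 10, 4], [13, 11, 10],
   [0, 6, 5],  [6, 5, 12],  [12, 11, 5], [13, 12, 11]]

def generateSupportPillarFaces_alt (zero : Int) : List (List Int) :=
  pillarFaceOffsets.map (fun face => face.map (fun offset => offset + zero))

-- ===== PRECONDITION & SPEC =====
def Spec_generateSupportPillarFaces (zero : Int) (out : List (List Int)) : Prop := out = generateSupportPillarFaces_alt zero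
instance (zero : Int) (out : List (List Int)) : Decidable (Spec_generateSupportPillarFaces zero out) := by unfold Spec_generateSupportPillarFaces; infer_instance

-- ===== CLAIM (what is proved, stated in full; the proofs are below) =====
def Claim_equal_generateSupportPillarFaces : Prop := ∀ (zero : Int), Dom_generateSupportPillarFaces zero → Spec_generateSupportPillarFaces zero (generateSupportPillarFaces zero)

-- ===== LEMMAS AND PROOFS =====

-- ===== VERDICT (by name: the statement is the Claim_ definition above) =====
theorem generateSupportPillarFaces_spec : Claim_equal_generateSupportPillarFaces := by
  intro zero _
  unfold Spec_generateSupportPillarFaces generateSupportPillarFaces generateSupportPillarFaces_alt pillarFaceOffsets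
  simp [PySem.List.pyRange_one, List.range_succ]
  ring_nf
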